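-- pv_equiv track=rewrite | github.com/pypi-data/pypi-mirror-401 | packages/delfin-complat/delfin_complat-1.0.8-py3-none-any.whl/delfin/co2/CO2_Coordinator6.py | _detect_qmmm_metadata_from_lines
-- ===== SOURCE A (Python) =====
-- from typing import Optional, Tuple, List, Dict, Sequence
--
-- _SEPARATOR_CHARS = {"$", "*"}
--
-- def _is_separator_line(stripped: str) -> bool:
--     return bool(stripped) and all(ch in _SEPARATOR_CHARS for ch in stripped)
--
-- def _detect_qmmm_metadata_from_lines(lines: Sequence[str]) -> Tuple[Optional[Tuple[int, int]], Optional[str]]: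
--     qm_count = 0
--     separator = None
--     for raw in lines:
--         stripped = raw.strip()
--         if not stripped:
--             continue
--         if _is_separator_line(stripped):
--             separator = stripped
--             break
--         qm_count += 1
--     if separator and qm_count > 0:
--         return (0, qm_count - 1), separator
--     return None, separator
-- ===== SOURCE B (Python) =====
-- from typing import Optional, Tuple, Sequence
--
-- _SEPARATOR_CHARS = {"$", "*"}
--
-- def _is_separator_line(stripped: str) -> bool:
--     return bool(stripped) and all(ch in _SEPARATOR_CHARS for ch in stripped)
--
-- def _detect_qmmm_metadata_from_lines(lines: Sequence[str]) -> Tuple[Optional[Tuple[int, int]], Optional[str]]: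
--     # Pass 1: locate the first separator line among the stripped lines.
--     stripped = [raw.strip() for raw in lines]
--     hit = next(((i, s) for i, s in enumerate(stripped) if _is_separator_line(s)), None)
--     if hit is None:
--         return None, None
--     idx, separator = hit
--     # Pass 2: count the non-blank lines strictly before the separator.
--     qm_count = sum(1 for s in stripped[:idx] if s)
--     if qm_count > 0:
--         return (0, qm_count - 1), separator
--     return None, separator
-- ===== Notes on version B (the rewrite author's own statement) =====
-- stated objective: alternative
-- what changed: A's single accumulate-and-break loop (counting non-blank lines while scanning for the separator) is replaced by two passes: strip all lines, locate the first separator line with next/enumerate, then count the non-blank stripped lines strictly before that index.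
import Mathlib
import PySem

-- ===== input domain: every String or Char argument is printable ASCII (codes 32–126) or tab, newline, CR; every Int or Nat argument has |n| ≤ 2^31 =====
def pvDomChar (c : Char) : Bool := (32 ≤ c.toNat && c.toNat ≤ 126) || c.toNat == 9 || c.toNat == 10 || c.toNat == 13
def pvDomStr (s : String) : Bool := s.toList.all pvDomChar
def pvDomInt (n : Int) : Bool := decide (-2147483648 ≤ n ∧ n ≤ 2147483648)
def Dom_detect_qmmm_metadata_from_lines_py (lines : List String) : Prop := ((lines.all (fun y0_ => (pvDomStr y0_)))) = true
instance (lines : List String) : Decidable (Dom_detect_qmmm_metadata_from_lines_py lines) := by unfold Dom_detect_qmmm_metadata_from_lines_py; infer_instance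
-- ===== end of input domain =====

-- B replaces A's single accumulate-and-break loop by two passes over the stripped lines:
-- locate the first separator with enumerate/next, then count non-blank lines before it (objective: alternative decomposition).

-- ===== PORT A =====
-- _is_separator_line: non-empty and every char in {'$','*'}
def pvIsSep (s : String) : Bool := (!(s == "")) && s.toList.all (fun ch => ch == '$' || ch == '*')

-- A's loop: accumulate qm_count, break at the first separator (break modelled by returning the final result there)
def pvALoop : List String → Int → (Option (Int × Int)) × Option String
  | [], _ => (none, none)          -- loop ended, separator is None → (None, None)
  | raw :: rest, qm =>
      let stripped := PySem.Str.strip raw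
      if stripped == "" then pvALoop rest qm
      else if pvIsSep stripped then
        (if (!(stripped == "")) && decide (qm > 0) then (some (0, qm - 1), some stripped)
         else (none, some stripped))
      else pvALoop rest (qm + 1)

def detect_qmmm_metadata_from_lines_py (lines : List String) : (Option (Int × Int)) × Option String :=
  pvALoop lines 0

-- ===== PORT B =====
def detect_qmmm_metadata_from_lines_py_alt (lines : List String) : (Option (Int × Int)) × Option String :=
  let stripped := lines.map (fun raw => PySem.Str.strip raw)
  match (PySem.List.enumerate stripped).find? (fun p => pvIsSep p.2) with
  | none => (none, none)
  | some (idx, separator) =>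
      let qm_count : Int :=
        (PySem.List.slice stripped none (some idx)).foldl
          (fun acc s => if !(s == "") then acc + 1 else acc) 0
      if qm_count > 0 then (some (0, qm_count - 1), some separator)
      else (none, some separator)

-- ===== PRECONDITION & SPEC =====
def Spec_detect_qmmm_metadata_from_lines_py (lines : List String) (out : (Option (Int × Int)) × Option String) : Prop := out = detect_qmmm_metadata_from_lines_py_alt lines
instance (lines : List String) (out : (Option (Int × Int)) × Option String) : Decidable (Spec_detect_qmmm_metadata_from_lines_py lines out) := by unfold Spec_detect_qmmm_metadata_from_lines_py; infer_instance

-- ===== CLAIM (what is proved, stated in full; the proofs are below) =====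
def Claim_equal_detect_qmmm_metadata_from_lines_py : Prop := ∀ (lines : List String), Dom_detect_qmmm_metadata_from_lines_py lines → Spec_detect_qmmm_metadata_from_lines_py lines (detect_qmmm_metadata_from_lines_py lines)

-- ===== LEMMAS AND PROOFS =====

-- main invariant: A's loop with accumulator qm equals B's shape read off the enumerate-find at start k
theorem pvKey (lines : List String) : ∀ (qm : Int) (k : Nat),
    pvALoop lines qm =
      (match (PySem.List.enumerate (lines.map (fun raw => PySem.Str.strip raw)) (k : Int)).find?
          (fun p => pvIsSep p.2) with
       | none => ((none, none) : (Option (Int × Int)) × Option String)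
       | some (idx, separator) =>
          let n : Int :=
            (PySem.List.slice (lines.map (fun raw => PySem.Str.strip raw)) none (some (idx - (k : Int)))).foldl
              (fun acc s => if !(s == "") then acc + 1 else acc) qm
          if n > 0 then (some (0, n - 1), some separator) else (none, some separator)) := by
  induction lines with
  | nil => intro qm k; simp [pvALoop, PySem.List.enumerate_nil]
  | cons raw rest ih =>
      intro qm k
      simp only [List.map_cons, PySem.List.enumerate_cons, List.find?_cons]
      by_cases hsep : pvIsSep (PySem.Str.strip raw) = true
      · have hne : (PySem.Str.strip raw == "") = false := by
          cases h : (PySem.Str.strip raw == "") with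
          | false => rfl
          | true => simp [pvIsSep, h] at hsep
        simp only [hsep, pvALoop, hne]
        have h0 : ((k : Int) - (k : Int)) = ((0 : Nat) : Int) := by omega
        rw [h0, PySem.List.slice_to_natCast]
        simp
      · have hsep' : pvIsSep (PySem.Str.strip raw) = false := by
          cases h : pvIsSep (PySem.Str.strip raw) <;> simp_all
        simp only [hsep']
        cases hf : (PySem.List.enumerate (rest.map (fun raw => PySem.Str.strip raw)) ((k : Int) + 1)).find?
            (fun p => pvIsSep p.2) with
        | none =>
            have := ih qm (k + 1)
            have := ih (qm + 1) (k + 1)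
            by_cases hb : (PySem.Str.strip raw == "") = true
            · simp only [pvALoop, hb, if_true]
              rw [ih qm (k + 1)]
              simp [hf]
            · simp only [pvALoop, hb, hsep']
              rw [ih (qm + 1) (k + 1)]
              simp [hf]
        | some p =>
            obtain ⟨idx, sep⟩ := p
            -- idx is an actual start+offset index: idx = (k+1) + j
            have hmem : (idx, sep) ∈ PySem.List.enumerate (rest.map (fun raw => PySem.Str.strip raw)) ((k : Int) + 1) :=
              List.mem_of_find?_eq_some hf
            rw [PySem.List.mem_enumerate_iff] at hmem
            obtain ⟨j, hj, hpe⟩ := hmem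
            have hidx : idx = (k : Int) + 1 + (j : Int) := by
              have := congrArg Prod.fst hpe; simpa using this
            have h1 : idx - (k : Int) = (((j + 1 : Nat)) : Int) := by omega
            have h2 : idx - ((k : Int) + 1) = ((j : Nat) : Int) := by
              have : (k : Int) + 1 = ((k + 1 : Nat) : Int) := by push_cast; ring
              omega
            have hck : (((k + 1 : Nat)) : Int) = (k : Int) + 1 := by push_cast; ring
            have hf' : (PySem.List.enumerate (rest.map (fun raw => PySem.Str.strip raw)) (((k + 1 : Nat)) : Int)).find?
                (fun p => pvIsSep p.2) = some (idx, sep) := by rw [hck]; exact hf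
            have h2' : idx - (((k + 1 : Nat)) : Int) = ((j : Nat) : Int) := by rw [hck]; omega
            by_cases hb : (PySem.Str.strip raw == "") = true
            · simp only [pvALoop, hb, if_true]
              rw [ih qm (k + 1)]
              simp only [hf']
              rw [h1, h2', PySem.List.slice_to_natCast, PySem.List.slice_to_natCast]
              have hbe : PySem.Str.strip raw = "" := by simpa using hb
              simp [List.take_succ_cons, hbe]
            · simp only [pvALoop, hb, hsep']
              rw [ih (qm + 1) (k + 1)]
              simp only [hf']
              rw [h1, h2', PySem.List.slice_to_natCast, PySem.List.slice_to_natCast]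
              have hbe : ¬ (PySem.Str.strip raw = "") := by simpa using hb
              simp [List.take_succ_cons, hbe]

-- ===== VERDICT (by name: the statement is the Claim_ definition above) =====
theorem detect_qmmm_metadata_from_lines_py_spec : Claim_equal_detect_qmmm_metadata_from_lines_py := by
  intro lines _
  unfold Spec_detect_qmmm_metadata_from_lines_py detect_qmmm_metadata_from_lines_py detect_qmmm_metadata_from_lines_py_alt
  rw [pvKey lines 0 0]
  simp only [Nat.cast_zero, sub_zero]
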